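-- pv_equiv track=rewrite | github.com/jaxels20/jaxels20.github.io | export_stats_report_pdf.py | clean_report_lines
-- ===== SOURCE A (Python) =====
-- def is_noise_line(line: str) -> bool:
--     stripped = line.strip()
--     if not stripped:
--         return False
--
--     if stripped.startswith("Border style is"):
--         return True
--     if stripped.startswith("Line style is"):
--         return True
--     if stripped.startswith("Null display is"):
--         return True
--     if stripped.startswith("Pager usage is"):
--         return True
--     if stripped in {
--         "SET",
--         "DROP VIEW",
--         "CREATE VIEW",
--         "DROP TABLE",
--         "CREATE TABLE",
--         "DROP INDEX",
--         "CREATE INDEX",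
--     }:
--         return True
--     if stripped.startswith("psql-") and "NOTICE:" in stripped:
--         return True
--
--     return False
--
-- def clean_report_lines(report_text: str) -> list[str]:
--     cleaned = [
--         line.rstrip() for line in report_text.splitlines() if not is_noise_line(line)
--     ]
--
--     while cleaned and cleaned[0].strip() == "":
--         cleaned.pop(0)
--     while cleaned and cleaned[-1].strip() == "":
--         cleaned.pop()
--
--     return cleaned
-- ===== SOURCE B (Python) =====
-- def is_noise_line(line: str) -> bool:
--     stripped = line.strip()
--     if not stripped:
--         return False
--     if stripped.startswith("Border style is"):
--         return True
--     if stripped.startswith("Line style is"):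
--         return True
--     if stripped.startswith("Null display is"):
--         return True
--     if stripped.startswith("Pager usage is"):
--         return True
--     if stripped in {
--         "SET",
--         "DROP VIEW",
--         "CREATE VIEW",
--         "DROP TABLE",
--         "CREATE TABLE",
--         "DROP INDEX",
--         "CREATE INDEX",
--     }:
--         return True
--     if stripped.startswith("psql-") and "NOTICE:" in stripped:
--         return True
--     return False
--
--
-- def clean_report_lines(report_text: str) -> list[str]:
--     result = []
--     pending = []          # blank lines seen after some content, not yet known to be interior
--     seen_content = False
--     for line in report_text.splitlines():
--         if is_noise_line(line):
--             continue
--         r = line.rstrip()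
--         if r.strip() == "":
--             if seen_content:
--                 pending.append(r)
--             # leading blanks are dropped
--         else:
--             if pending:
--                 result.extend(pending)
--                 pending = []
--             result.append(r)
--             seen_content = True
--     # trailing blanks are exactly the never-flushed pending buffer
--     return result
-- ===== Notes on version B (the rewrite author's own statement) =====
-- stated objective: alternative
-- what changed: Single pass with a seen-content flag and a pending-blanks buffer instead of building the filtered list and then popping blanks from both ends in two while loops.
import Mathlib
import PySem

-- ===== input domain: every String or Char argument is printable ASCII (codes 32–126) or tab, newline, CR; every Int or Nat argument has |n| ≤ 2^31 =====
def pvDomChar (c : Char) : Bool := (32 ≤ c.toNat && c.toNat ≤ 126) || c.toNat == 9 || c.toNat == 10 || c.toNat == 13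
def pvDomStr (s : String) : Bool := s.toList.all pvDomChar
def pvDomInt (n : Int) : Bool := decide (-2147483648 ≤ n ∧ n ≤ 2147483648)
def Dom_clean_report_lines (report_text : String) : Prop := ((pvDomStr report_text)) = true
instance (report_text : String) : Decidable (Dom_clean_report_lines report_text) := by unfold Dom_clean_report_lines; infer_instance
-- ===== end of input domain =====

-- B does one pass with a seen-content flag and a pending-blanks buffer instead of filtering
-- into a list and then popping blanks from both ends; same result, no speed claim.

-- ===== PORT A =====
-- shared module helper (used verbatim by both Pythons)
def is_noise_line (line : String) : Bool :=
  let stripped := PySem.Str.strip line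
  if stripped == "" then false
  else if PySem.Str.startswith stripped "Border style is" then true
  else if PySem.Str.startswith stripped "Line style is" then true
  else if PySem.Str.startswith stripped "Null display is" then true
  else if PySem.Str.startswith stripped "Pager usage is" then true
  else if ["SET", "DROP VIEW", "CREATE VIEW", "DROP TABLE", "CREATE TABLE",
           "DROP INDEX", "CREATE INDEX"].contains stripped then true
  else if PySem.Str.startswith stripped "psql-" && PySem.Str.isIn "NOTICE:" stripped then true
  else false

-- while cleaned and cleaned[0].strip() == "": cleaned.pop(0)
def trimFrontA : List String → List String
  | [] => []
  | x :: xs => if PySem.Str.strip x == "" then trimFrontA xs else x :: xs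

-- while cleaned and cleaned[-1].strip() == "": cleaned.pop()
def trimBackA : List String → List String
  | [] => []
  | x :: xs =>
    match trimBackA xs with
    | [] => if PySem.Str.strip x == "" then [] else [x]
    | y :: ys => x :: y :: ys

def clean_report_lines (report_text : String) : List String :=
  let cleaned :=
    ((PySem.Str.splitlines report_text).filter (fun line => !is_noise_line line)).map
      PySem.Str.rstrip
  trimBackA (trimFrontA cleaned)

-- ===== PORT B =====
def altLoop : List String → Bool → List String → List String → List String
  | [], _, _, result => result
  | line :: rest, seen, pending, result =>
    if is_noise_line line then altLoop rest seen pending result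
    else
      let r := PySem.Str.rstrip line
      if PySem.Str.strip r == "" then
        if seen then altLoop rest seen (pending ++ [r]) result
        else altLoop rest seen pending result
      else altLoop rest true [] (result ++ pending ++ [r])

def clean_report_lines_alt (report_text : String) : List String :=
  altLoop (PySem.Str.splitlines report_text) false [] []

-- ===== PRECONDITION & SPEC =====
def Spec_clean_report_lines (report_text : String) (out : List String) : Prop := out = clean_report_lines_alt report_text
instance (report_text : String) (out : List String) : Decidable (Spec_clean_report_lines report_text out) := by unfold Spec_clean_report_lines; infer_instance

-- ===== CLAIM (what is proved, stated in full; the proofs are below) =====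
def Claim_equal_clean_report_lines : Prop := ∀ (report_text : String), Dom_clean_report_lines report_text → Spec_clean_report_lines report_text (clean_report_lines report_text)

-- ===== LEMMAS AND PROOFS =====

def keptOf (lines : List String) : List String :=
  (lines.filter (fun line => !is_noise_line line)).map PySem.Str.rstrip

theorem trimBackA_all_blank (xs : List String)
    (h : ∀ x ∈ xs, PySem.Str.strip x == "") : trimBackA xs = [] := by
  induction xs with
  | nil => rfl
  | cons x xs ih =>
    have hx := h x (by simp)
    simp [trimBackA, ih (fun y hy => h y (by simp [hy])), hx]

theorem trimBackA_append_cons (xs ys : List String) (y : String)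
    (hy : ¬ (PySem.Str.strip y == "") = true) :
    trimBackA (xs ++ y :: ys) = xs ++ y :: trimBackA ys := by
  induction xs with
  | nil =>
    simp only [List.nil_append, trimBackA]
    cases h : trimBackA ys with
    | nil => simp [hy]
    | cons z zs => rfl
  | cons x xs ih =>
    simp only [List.cons_append, trimBackA, ih]
    cases xs <;> simp

theorem keptOf_cons_keep (line : String) (rest : List String)
    (hn : ¬ is_noise_line line = true) :
    keptOf (line :: rest) = PySem.Str.rstrip line :: keptOf rest := by
  simp [keptOf, hn]

theorem altLoop_seen (lines : List String) : ∀ pending result,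
    (∀ x ∈ pending, PySem.Str.strip x == "") →
    altLoop lines true pending result = result ++ trimBackA (pending ++ keptOf lines) := by
  induction lines with
  | nil =>
    intro pending result hp
    simp [altLoop, keptOf, trimBackA_all_blank pending hp]
  | cons line rest ih =>
    intro pending result hp
    by_cases hn : is_noise_line line
    · simp [altLoop, hn, keptOf, ih pending result hp]
    · by_cases hb : (PySem.Str.strip (PySem.Str.rstrip line) == "") = true
      · have h' : ∀ x ∈ pending ++ [PySem.Str.rstrip line], PySem.Str.strip x == "" := by
          intro x hx
          rcases List.mem_append.1 hx with h | h
          · exact hp x h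
          · simp at h; subst h; exact hb
        simp [altLoop, hn, hb, ih _ result h', keptOf]
      · have hI := ih [] (result ++ pending ++ [PySem.Str.rstrip line]) (by simp)
        simp only [List.nil_append] at hI
        simp only [altLoop, hn, hb, if_false, Bool.false_eq_true]
        rw [hI, keptOf_cons_keep line rest hn,
          trimBackA_append_cons pending (keptOf rest) (PySem.Str.rstrip line) hb]
        simp

theorem altLoop_unseen (lines : List String) :
    altLoop lines false [] [] = trimBackA (trimFrontA (keptOf lines)) := by
  induction lines with
  | nil => rfl
  | cons line rest ih =>
    by_cases hn : is_noise_line line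
    · simp [altLoop, hn, keptOf, ih]
    · by_cases hb : (PySem.Str.strip (PySem.Str.rstrip line) == "") = true
      · simp [altLoop, hn, hb, keptOf, trimFrontA, ih]
      · have h1 := altLoop_seen rest [] [PySem.Str.rstrip line] (by simp)
        have h2 := trimBackA_append_cons [] (keptOf rest) (PySem.Str.rstrip line) hb
        simp only [List.nil_append] at h1
        simp only [altLoop, hn, hb, Bool.false_eq_true, if_false, List.nil_append, List.append_nil]
        rw [h1, keptOf_cons_keep line rest hn, trimFrontA]
        simp only [List.nil_append] at h2
        simp [hb, h2]

-- ===== VERDICT (by name: the statement is the Claim_ definition above) =====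
theorem clean_report_lines_spec : Claim_equal_clean_report_lines := by
  intro report_text _
  unfold Spec_clean_report_lines clean_report_lines clean_report_lines_alt
  rw [altLoop_unseen]
  rfl
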